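-- pv_equiv track=rewrite | github.com/timothyschoen/CSD2a | python_music/funk2.py | lengthgenerator
-- ===== SOURCE A (Python) =====
-- def lengthgenerator(list):
--     distlist = [0 for x in range(32)]
--     sum = 0
--     list = list[::-1]
--     for i in range(len(list)):
--         if list[i] != 0:
--             distlist[31-i] = sum
--             sum = 0
--         else:
--             sum = sum+1
--     return distlist
-- ===== SOURCE B (Python) =====
-- def lengthgenerator(list):
--     distlist = [0] * 32
--     rev = list[::-1]
--     nonzero = [i for i in range(len(rev)) if rev[i] != 0]
--     prev = -1
--     for idx in nonzero:
--         distlist[31 - idx] = idx - prev - 1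
--         prev = idx
--     return distlist
-- ===== Notes on version B (the rewrite author's own statement) =====
-- stated objective: alternative
-- what changed: B first collects the reversed positions of the nonzero elements, then fills the gaps as differences of consecutive nonzero indices (idx - prev - 1), instead of A's single scan carrying a running zero-counter accumulator.
import Mathlib
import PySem

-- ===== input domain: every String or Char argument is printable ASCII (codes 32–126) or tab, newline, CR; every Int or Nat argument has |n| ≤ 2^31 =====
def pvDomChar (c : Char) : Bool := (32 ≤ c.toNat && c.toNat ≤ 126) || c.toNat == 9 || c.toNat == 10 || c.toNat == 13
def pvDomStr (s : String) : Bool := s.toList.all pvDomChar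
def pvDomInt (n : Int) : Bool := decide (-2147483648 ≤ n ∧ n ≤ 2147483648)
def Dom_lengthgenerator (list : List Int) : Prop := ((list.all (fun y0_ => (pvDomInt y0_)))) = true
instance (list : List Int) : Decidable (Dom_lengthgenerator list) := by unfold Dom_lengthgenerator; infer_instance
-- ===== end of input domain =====

-- B replaces A's running zero-counter scan by collecting the nonzero positions first and
-- writing each gap as a difference of consecutive nonzero indices (objective: alternative decomposition).

-- ===== PORT A =====
-- 'for i in range(len(list)): if list[i] != 0: distlist[31-i] = sum; sum = 0 else: sum += 1'
-- as structural recursion over the reversed list, carrying the running index i and the state (distlist, sum)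
def lgLoopA : List Int → Nat → List Int → Int → List Int
  | [], _, d, _ => d
  | x :: t, i, d, s =>
      if x ≠ 0 then lgLoopA t (i + 1) (PySem.List.pySetD d (31 - (i : Int)) s) 0
      else lgLoopA t (i + 1) d (s + 1)

def lengthgenerator (list : List Int) : List Int :=
  let distlist : List Int := List.replicate 32 0          -- [0 for x in range(32)]
  let rev := (PySem.List.slice? list none none (-1)).getD []   -- list = list[::-1]
  lgLoopA rev 0 distlist 0

-- ===== PORT B =====
-- '[i for i in range(len(rev)) if rev[i] != 0]'
def lgNz : List Int → Nat → List Nat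
  | [], _ => []
  | x :: t, i => if x ≠ 0 then i :: lgNz t (i + 1) else lgNz t (i + 1)

-- 'for idx in nonzero: distlist[31-idx] = idx - prev - 1; prev = idx'
def lgLoopB : List Nat → Int → List Int → List Int
  | [], _, d => d
  | idx :: rest, prev, d =>
      lgLoopB rest (idx : Int) (PySem.List.pySetD d (31 - (idx : Int)) ((idx : Int) - prev - 1))

def lengthgenerator_alt (list : List Int) : List Int :=
  let rev := (PySem.List.slice? list none none (-1)).getD []
  lgLoopB (lgNz rev 0) (-1) (List.replicate 32 0)

-- ===== PRECONDITION & SPEC =====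
-- A (and B alike) raises IndexError when a nonzero element sits at reversed index ≥ 64,
-- i.e. among the first length-64 elements of the original list; Pre_ excludes exactly those inputs.
def Pre_lengthgenerator (list : List Int) : Prop :=
  ((list.take (list.length - 64)).all (fun x => x == 0)) = true
instance (list : List Int) : Decidable (Pre_lengthgenerator list) := by
  unfold Pre_lengthgenerator; infer_instance

def pvWitness_lengthgenerator : List Int := [1, 2, 0, 0, 3, 0]

def Spec_lengthgenerator (list : List Int) (out : List Int) : Prop := out = lengthgenerator_alt list
instance (list : List Int) (out : List Int) : Decidable (Spec_lengthgenerator list out) := by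
  unfold Spec_lengthgenerator; infer_instance

-- ===== CLAIM (what is proved, stated in full; the proofs are below) =====
def Claim_equal_lengthgenerator : Prop := ∀ (list : List Int), Dom_lengthgenerator list → Pre_lengthgenerator list → Spec_lengthgenerator list (lengthgenerator list)

-- ===== LEMMAS AND PROOFS =====

-- loop correspondence: A's accumulator s relates to B's prev by prev = i - s - 1
lemma lg_loop_eq (xs : List Int) : ∀ (i : ℕ) (d : List Int) (s : Int),
    lgLoopA xs i d s = lgLoopB (lgNz xs i) ((i : Int) - s - 1) d := by
  induction xs with
  | nil => intro i d s; rfl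
  | cons x t ih =>
    intro i d s
    by_cases hx : x = 0
    · simp only [lgLoopA, lgNz, hx, ne_eq, not_true_eq_false, if_false]
      rw [ih]
      congr 1
      push_cast; ring
    · simp only [lgLoopA, lgNz, ne_eq, hx, not_false_eq_true, if_true]
      rw [ih, lgLoopB]
      have h1 : ((i : Int) + 1) - 0 - 1 = (i : Int) := by ring
      have h2 : (i : Int) - ((i : Int) - s - 1) - 1 = s := by ring
      rw [Nat.cast_add, Nat.cast_one, h1, h2]

-- ===== VERDICT (by name: the statement is the Claim_ definition above) =====
theorem lengthgenerator_spec : Claim_equal_lengthgenerator := by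
  unfold Claim_equal_lengthgenerator
  intro list _ _
  show lengthgenerator list = lengthgenerator_alt list
  unfold lengthgenerator lengthgenerator_alt
  simp only [lg_loop_eq]
  norm_num
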